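-- pv_equiv track=rewrite | github.com/michaelliudl/CodingInterviewPython | com/leetcode/greedy/00826_m_most profit assigning work.py | maxProfitAssignment1
-- ===== SOURCE A (Python) =====
-- from typing import List
--
-- def maxProfitAssignment1(difficulty: List[int], profit: List[int], worker: List[int]) -> int:
--     if not difficulty or not profit or not worker:
--         return 0
--     if len(difficulty) != len(profit):
--         return 0
--     n, m = len(difficulty), len(worker)
--     jobs = [(difficulty[i], profit[i]) for i in range(n)]
--     jobs.sort()
--     worker.sort()
--     result = 0
--     maxProf = 0
--     jobIndex = 0
--     for w in worker:
--         while jobIndex < n and w >= jobs[jobIndex][0]: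
--             maxProf = max(maxProf, jobs[jobIndex][1])
--             jobIndex += 1
--         result += maxProf
--     return result
-- ===== SOURCE B (Python) =====
-- def maxProfitAssignment1(difficulty, profit, worker):
--     if not difficulty or not profit or not worker:
--         return 0
--     if len(difficulty) != len(profit):
--         return 0
--     worker.sort()  # A sorts worker in place; kept so the caller-visible mutation matches
--     total = 0
--     for w in worker:
--         best = 0
--         for d, p in zip(difficulty, profit):
--             if d <= w and best < p:
--                 best = p
--         total += best
--     return total
-- ===== Notes on version B (the rewrite author's own statement) =====
-- stated objective: simpler
-- what changed: Replaced the sort-jobs + sorted-worker two-pointer co-sweep with carried state (result, maxProf, jobIndex) by a direct per-worker scan that takes the best profit among jobs the worker can do; no job list, no job sorting, no carry between workers.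
import Mathlib
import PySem

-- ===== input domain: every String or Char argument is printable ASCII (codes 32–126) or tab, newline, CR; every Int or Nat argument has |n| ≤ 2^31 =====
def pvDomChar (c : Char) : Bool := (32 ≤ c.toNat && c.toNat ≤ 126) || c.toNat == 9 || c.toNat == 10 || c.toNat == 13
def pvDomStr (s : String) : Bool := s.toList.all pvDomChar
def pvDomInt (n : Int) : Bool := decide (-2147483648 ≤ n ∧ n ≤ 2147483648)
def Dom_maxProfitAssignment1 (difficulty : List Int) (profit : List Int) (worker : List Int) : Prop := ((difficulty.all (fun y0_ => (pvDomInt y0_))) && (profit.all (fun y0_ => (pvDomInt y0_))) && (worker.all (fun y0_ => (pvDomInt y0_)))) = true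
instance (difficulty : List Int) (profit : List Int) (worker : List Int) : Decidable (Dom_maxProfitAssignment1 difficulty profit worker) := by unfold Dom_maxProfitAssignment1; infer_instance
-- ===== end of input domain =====

-- B replaces A's sort-jobs + two-pointer co-sweep by a direct per-worker scan (simpler, not faster).
-- A sorts `worker` in place; B performs the same sort, and the equivalence proved is about the return value.


-- ===== PORT A =====
-- the inner `while jobIndex < n and w >= jobs[jobIndex][0]` loop of A, state (maxProf, jobIndex)
def pvWhileA (jobs : List (Int × Int)) (w : Int) (mp : Int) (j : Nat) : Int × Nat :=
  if h : j < jobs.length ∧ (jobs.getD j (0, 0)).1 ≤ w then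
    pvWhileA jobs w (max mp (jobs.getD j (0, 0)).2) (j + 1)
  else (mp, j)
termination_by jobs.length - j
decreasing_by omega

def maxProfitAssignment1 (difficulty : List Int) (profit : List Int) (worker : List Int) : Int :=
  if difficulty = [] ∨ profit = [] ∨ worker = [] then 0
  else if difficulty.length ≠ profit.length then 0
  else
    let n := difficulty.length
    let jobs := PySem.List.sorted2
      ((List.range n).map (fun i => (difficulty.getD i 0, profit.getD i 0)))
      Prod.fst Prod.snd
    let ws := PySem.List.sorted worker (fun w => w)
    (ws.foldl (fun (st : Int × Int × Nat) w =>
        let p := pvWhileA jobs w st.2.1 st.2.2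
        (st.1 + p.1, p.1, p.2)) (0, 0, 0)).1

-- ===== PORT B =====
-- best profit among jobs this worker can do (inner for-loop of B)
def pvBestB (difficulty : List Int) (profit : List Int) (w : Int) : Int :=
  (difficulty.zip profit).foldl
    (fun best dp => if dp.1 ≤ w ∧ best < dp.2 then dp.2 else best) 0

def maxProfitAssignment1_alt (difficulty : List Int) (profit : List Int) (worker : List Int) : Int :=
  if difficulty = [] ∨ profit = [] ∨ worker = [] then 0
  else if difficulty.length ≠ profit.length then 0
  else
    (PySem.List.sorted worker (fun w => w)).foldl
      (fun total w => total + pvBestB difficulty profit w) 0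

-- ===== PRECONDITION & SPEC =====
def Spec_maxProfitAssignment1 (difficulty : List Int) (profit : List Int) (worker : List Int) (out : Int) : Prop := out = maxProfitAssignment1_alt difficulty profit worker
instance (difficulty : List Int) (profit : List Int) (worker : List Int) (out : Int) : Decidable (Spec_maxProfitAssignment1 difficulty profit worker out) := by unfold Spec_maxProfitAssignment1; infer_instance

-- ===== CLAIM (what is proved, stated in full; the proofs are below) =====
def Claim_equal_maxProfitAssignment1 : Prop := ∀ (difficulty : List Int) (profit : List Int) (worker : List Int), Dom_maxProfitAssignment1 difficulty profit worker → Spec_maxProfitAssignment1 difficulty profit worker (maxProfitAssignment1 difficulty profit worker)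

-- ===== LEMMAS AND PROOFS =====

-- max profit with a `d ≤ w` filter, and plain max profit, as left folds
def pvGMax (w : Int) (l : List (Int × Int)) : Int :=
  l.foldl (fun b dp => if dp.1 ≤ w then max b dp.2 else b) 0

def pvMaxP (l : List (Int × Int)) : Int :=
  l.foldl (fun b dp => max b dp.2) 0

-- B's inner loop computes pvGMax over the zip
theorem pvBestB_eq_gMax (d p : List Int) (w : Int) :
    pvBestB d p w = pvGMax w (d.zip p) := by
  unfold pvBestB pvGMax
  apply PySem.List.foldl_congr_mem
  intro acc dp _
  split_ifs <;> omega

-- pvGMax is invariant under permutation of the job list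
theorem pvGMax_perm (w : Int) {l l' : List (Int × Int)} (h : l.Perm l') :
    pvGMax w l = pvGMax w l' := by
  unfold pvGMax
  exact @List.Perm.foldl_eq _ _ _ _ _
    ⟨fun b a a' => by split_ifs <;> omega⟩ h 0

-- jobs built by index equals zip when the lengths agree
theorem range_map_eq_zip (d p : List Int) (h : d.length = p.length) :
    (List.range d.length).map (fun i => (d.getD i 0, p.getD i 0)) = d.zip p := by
  apply List.ext_getElem
  · simp [h]
  · intro i h1 h2
    have hd : i < d.length := by simpa using h1
    simp only [List.getElem_map, List.getElem_range, List.getElem_zip]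
    rw [List.getD_eq_getElem _ _ hd, List.getD_eq_getElem _ _ (by omega)]

-- insertBy preserves Pairwise for a total transitive relation decided by `before`
theorem pairwise_insertBy {α : Type} (before : α → α → Bool) (R : α → α → Prop)
    (htrans : ∀ a b c, R a b → R b c → R a c)
    (h1 : ∀ a b, before a b = true → R a b)
    (h2 : ∀ a b, before a b = false → R b a)
    (x : α) (l : List α) (hl : l.Pairwise R) :
    (PySem.List.insertBy before x l).Pairwise R := by
  induction l with
  | nil => simp [PySem.List.insertBy]
  | cons y ys ih =>
    rcases List.pairwise_cons.mp hl with ⟨hy, hys⟩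
    by_cases hb : before x y = true
    · simp only [PySem.List.insertBy, hb, if_true]
      refine List.pairwise_cons.mpr ⟨?_, hl⟩
      intro z hz
      rcases List.mem_cons.mp hz with rfl | hz
      · exact h1 _ _ hb
      · exact htrans _ _ _ (h1 _ _ hb) (hy _ hz)
    · simp only [PySem.List.insertBy, hb, if_false]
      refine List.pairwise_cons.mpr ⟨?_, ih hys⟩
      intro z hz
      rcases (PySem.List.mem_insertBy before x z ys).mp hz with rfl | hz
      · exact h2 _ _ (by simpa using hb)
      · exact hy _ hz

-- sorted2 with fst/snd keys, unfolded (definitional)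
theorem sorted2_eq_foldl (l : List (Int × Int)) :
    PySem.List.sorted2 l Prod.fst Prod.snd =
      l.foldl (fun acc x => PySem.List.insertBy
        (fun a b => decide (a.1 < b.1) || (!decide (b.1 < a.1) && decide (a.2 < b.2))) x acc) [] := rfl

-- the sorted2 job list has nondecreasing difficulties
theorem sorted2_pairwise_fst (l : List (Int × Int)) :
    (PySem.List.sorted2 l Prod.fst Prod.snd).Pairwise (fun a b => a.1 ≤ b.1) := by
  rw [sorted2_eq_foldl]
  have key : ∀ (xs acc : List (Int × Int)), acc.Pairwise (fun a b => a.1 ≤ b.1) →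
      (xs.foldl (fun acc x => PySem.List.insertBy
        (fun a b => decide (a.1 < b.1) || (!decide (b.1 < a.1) && decide (a.2 < b.2))) x acc) acc).Pairwise
        (fun a b => a.1 ≤ b.1) := by
    intro xs
    induction xs with
    | nil => intro acc h; exact h
    | cons x xs ih =>
      intro acc h
      refine ih _ (pairwise_insertBy _ _ (fun a b c => by omega) ?_ ?_ x acc h)
      · intro a b hb; simp only [Bool.or_eq_true, Bool.and_eq_true, Bool.not_eq_eq_eq_not,
          Bool.not_true, decide_eq_true_eq, decide_eq_false_iff_not] at hb; omega
      · intro a b hb; simp only [Bool.or_eq_false_iff, Bool.and_eq_false_iff, Bool.not_eq_eq_eq_not,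
          Bool.not_false, decide_eq_false_iff_not, decide_eq_true_eq] at hb; omega
  exact key l [] (by simp)

-- A's while loop: from a consumed prefix, it consumes exactly the jobs with difficulty ≤ w
theorem pvWhileA_spec (jobs : List (Int × Int))
    (hs : jobs.Pairwise (fun a b => a.1 ≤ b.1)) (w : Int) :
    ∀ k j mp, jobs.length - j ≤ k →
      (∀ dp ∈ jobs.take j, dp.1 ≤ w) → mp = pvMaxP (jobs.take j) →
      ∃ j', pvWhileA jobs w mp j = (pvMaxP (jobs.take j'), j') ∧
        (∀ dp ∈ jobs.take j', dp.1 ≤ w) ∧ (∀ dp ∈ jobs.drop j', w < dp.1) := by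
  intro k
  induction k with
  | zero =>
    intro j mp hk h1 h2
    have hj : jobs.length ≤ j := by omega
    refine ⟨j, ?_, h1, ?_⟩
    · rw [pvWhileA, dif_neg (by omega)]; rw [h2]
    · intro dp hdp
      rw [List.drop_eq_nil_of_le hj] at hdp
      simp at hdp
  | succ k ih =>
    intro j mp hk h1 h2
    by_cases h : j < jobs.length ∧ (jobs.getD j (0, 0)).1 ≤ w
    · rw [pvWhileA, dif_pos h]
      have hget : jobs.getD j (0, 0) = jobs[j]'h.1 := List.getD_eq_getElem _ _ h.1
      have htake : jobs.take (j + 1) = jobs.take j ++ [jobs[j]'h.1] := by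
        rw [List.take_add_one]
        congr 1
        simp [List.getElem?_eq_getElem h.1]
      refine ih (j + 1) _ (by omega) ?_ ?_
      · intro dp hdp
        rw [htake] at hdp
        rcases List.mem_append.mp hdp with hdp | hdp
        · exact h1 _ hdp
        · simp only [List.mem_singleton] at hdp
          subst hdp; rw [← hget]; exact h.2
      · rw [htake]
        simp only [pvMaxP, List.foldl_append, List.foldl_cons, List.foldl_nil]
        rw [h2]
        unfold pvMaxP
        simp only [hget]
    · rw [pvWhileA, dif_neg h]
      refine ⟨j, by rw [h2], h1, ?_⟩
      intro dp hdp
      by_cases hj : j < jobs.length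
      · have hw : w < (jobs[j]'hj).1 := by
          rw [← List.getD_eq_getElem _ (0,0) hj]
          rw [not_and] at h
          exact not_le.mp (h hj)
        obtain ⟨i, hi, rfl⟩ := List.mem_iff_getElem.mp hdp
        have hlen : i + j < jobs.length := by
          have := hi; simp [List.length_drop] at this; omega
        have : (jobs.drop j)[i] = jobs[j + i]'(by omega) := by
          simp [List.getElem_drop]
        rw [this]
        rcases Nat.eq_zero_or_pos i with hz | hpos
        · subst hz; simpa using hw
        · have := (List.pairwise_iff_getElem.mp hs) j (j + i) hj (by omega) (by omega)
          omega
      · rw [List.drop_eq_nil_of_le (by omega)] at hdp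
        simp at hdp

-- pvGMax of a list split into a ≤ w prefix and a > w suffix is pvMaxP of the prefix
theorem pvGMax_eq_maxP (w : Int) (l : List (Int × Int)) (j : Nat)
    (h1 : ∀ dp ∈ l.take j, dp.1 ≤ w) (h2 : ∀ dp ∈ l.drop j, w < dp.1) :
    pvGMax w l = pvMaxP (l.take j) := by
  unfold pvGMax pvMaxP
  conv_lhs => rw [← List.take_append_drop j l]
  rw [List.foldl_append]
  have hpre : (l.take j).foldl (fun b dp => if dp.1 ≤ w then max b dp.2 else b) 0
      = (l.take j).foldl (fun b dp => max b dp.2) 0 := by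
    apply PySem.List.foldl_congr_mem
    intro acc dp hdp
    rw [if_pos (h1 _ hdp)]
  rw [hpre]
  generalize (l.take j).foldl (fun b dp => max b dp.2) 0 = m
  rw [PySem.List.foldl_congr_mem (l.drop j) _ (fun b _ => b) m
    (fun acc dp hdp => by rw [if_neg (by have := h2 _ hdp; omega)])]
  simp

-- main invariant of A's outer loop
theorem pvMainA (jobs : List (Int × Int)) (hs : jobs.Pairwise (fun a b => a.1 ≤ b.1)) :
    ∀ (ws : List Int) (res mp : Int) (j : Nat), ws.Pairwise (· ≤ ·) →
      (∀ dp ∈ jobs.take j, ∀ w ∈ ws, dp.1 ≤ w) → mp = pvMaxP (jobs.take j) →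
      (ws.foldl (fun (st : Int × Int × Nat) w =>
          let p := pvWhileA jobs w st.2.1 st.2.2
          (st.1 + p.1, p.1, p.2)) (res, mp, j)).1
        = res + (ws.map (fun w => pvGMax w jobs)).sum := by
  intro ws
  induction ws with
  | nil => intro res mp j _ _ _; simp
  | cons w ws ih =>
    intro res mp j hpw hall hmp
    rcases List.pairwise_cons.mp hpw with ⟨hw, hpw'⟩
    obtain ⟨j', heq, h1', h2'⟩ := pvWhileA_spec jobs hs w jobs.length j mp (by omega)
      (fun dp hdp => hall dp hdp w (List.mem_cons_self ..)) hmp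
    simp only [List.foldl_cons, List.map_cons, List.sum_cons, heq]
    rw [ih (res + pvMaxP (jobs.take j')) _ j' hpw'
      (fun dp hdp w' hw' => le_trans (h1' dp hdp) (hw w' hw')) rfl]
    rw [pvGMax_eq_maxP w jobs j' h1' h2']
    ring

-- ===== VERDICT (by name: the statement is the Claim_ definition above) =====
theorem maxProfitAssignment1_spec : Claim_equal_maxProfitAssignment1 := by
  intro d p wk _
  unfold Spec_maxProfitAssignment1 maxProfitAssignment1 maxProfitAssignment1_alt
  by_cases hempty : d = [] ∨ p = [] ∨ wk = []
  · rw [if_pos hempty, if_pos hempty]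
  rw [if_neg hempty, if_neg hempty]
  by_cases hlen : d.length ≠ p.length
  · rw [if_pos hlen, if_pos hlen]
  rw [if_neg hlen, if_neg hlen]
  simp only [ne_eq, not_not] at hlen
  simp only []
  rw [range_map_eq_zip d p hlen]
  have hperm : (PySem.List.sorted2 (d.zip p) Prod.fst Prod.snd).Perm (d.zip p) :=
    PySem.List.sorted2_perm (d.zip p) Prod.fst Prod.snd false
  rw [pvMainA _ (sorted2_pairwise_fst _) _ 0 0 0
    (PySem.List.sorted_pairwise wk (fun w => w)) (by simp) rfl]
  rw [PySem.List.foldl_add]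
  congr 1
  congr 1
  apply List.map_congr_left
  intro w _
  rw [pvBestB_eq_gMax, pvGMax_perm w hperm]
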